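-- pv_equiv track=rewrite | github.com/aditya-reserach/Hacker-Rank-Python | 41.Incorrect Regex.py | is_valid_regex
-- ===== SOURCE A (Python) =====
-- def is_valid_regex(p):
--     n = len(p)           # Total length of regex string.
--     i = 0                # Pointer/index to traverse the string.
--     stack = []           # Used for keeping track of '(' and ')'.
--     prev = None          # Stores the type of previous character.
--
--     # Traverse through all characters of the string.
--     while i < n:
--         ch = p[i]        # Current character at position i.
--
--         # Case 1: Escape sequence (e.g., \+)
--         if ch == '\\':
--             i += 1       # Move to next character.
--             if i >= n:   # If '\' is last character, invalid.
--                 return False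
--             prev = 'literal'  # Escaped character counts as literal.
--             i += 1       # Move past escaped character.
--             continue
--
--         # Case 2: Opening parenthesis '('
--         if ch == '(':
--             stack.append(')')  # Push closing bracket expectation.
--             prev = 'open'      # Last seen was an opening bracket.
--             i += 1
--             continue
--
--         # Case 3: Closing parenthesis ')'
--         if ch == ')':
--             if not stack or stack.pop() != ')':  # Check balance.
--                 return False
--             prev = 'close'  # Last seen was a closing bracket.
--             i += 1
--             continue
--
--         # Case 4: Character set '[ ... ]'
--         if ch == '[':
--             j = i + 1
--             if j >= n:
--                 return False
--             found = False
--             while j < n: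
--                 if p[j] == '\\':  # Skip escaped chars inside [].
--                     j += 2
--                     continue
--                 if p[j] == ']':   # Found closing bracket.
--                     found = True
--                     break
--                 j += 1
--             if not found:
--                 return False
--             prev = 'literal'
--             i = j + 1   # Move pointer after ']'
--             continue
--
--         # Case 5: Quantifiers {m,n}
--         if ch == '{':
--             j = i + 1
--             if j < n and p[j].isdigit():
--                 while j < n and p[j].isdigit():
--                     j += 1
--                 if j < n and p[j] == ',':
--                     j += 1
--                     while j < n and p[j].isdigit():
--                         j += 1
--                 if j < n and p[j] == '}':
--                     if prev not in ('literal', 'close'):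
--                         return False
--                     prev = 'quantifier'
--                     i = j + 1
--                     continue
--             prev = 'literal'
--             i += 1
--             continue
--
--         # Case 6: Quantifiers *, +, ?
--         if ch in '*+?':
--             if prev not in ('literal', 'close'):  # Must follow a literal.
--                 return False
--             prev = 'quantifier'
--             i += 1
--             continue
--
--         # Case 7: Extra closing brackets '}' or ']'
--         if ch == '}' or ch == ']':
--             return False
--
--         # Default: Treat as literal.
--         prev = 'literal'
--         i += 1
--
--     # At the end, check if stack is empty (all '(' closed).
--     if stack:
--         return False
--     return True
-- ===== SOURCE B (Python) =====
-- # Streaming DFA re-implementation: a single pass over the characters with an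
-- # explicit mode (normal / escape / char-class / brace-quantifier phases), a
-- # "quantifiable" flag and a paren depth counter -- no index arithmetic and no
-- # inner lookahead scans.
--
-- NORMAL, ESC, CLS, CLS_ESC, BR0, BR1, BR2 = range(7)
--
--
-- def is_valid_regex(p):
--     mode = NORMAL
--     q = False          # previous atom may take a quantifier (literal or close)
--     depth = 0          # open parenthesis depth
--     saved_q = False    # q as it was just before the current '{'
--     for ch in p:
--         if mode == ESC:
--             q = True
--             mode = NORMAL
--             continue
--         if mode == CLS_ESC:
--             mode = CLS
--             continue
--         if mode == CLS:
--             if ch == '\\':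
--                 mode = CLS_ESC
--             elif ch == ']':
--                 q = True
--                 mode = NORMAL
--             continue
--         if mode != NORMAL:          # one of the brace phases BR0/BR1/BR2
--             if ch.isdigit():
--                 if mode == BR0:
--                     mode = BR1
--                 continue
--             if mode == BR1 and ch == ',':
--                 mode = BR2
--                 continue
--             if mode != BR0 and ch == '}':
--                 if not saved_q:
--                     return False
--                 q = False
--                 mode = NORMAL
--                 continue
--             # not a quantifier after all: the '{' and the digits/comma scanned
--             # so far all count as literals; reprocess ch in normal mode
--             mode = NORMAL
--             q = True
--         if ch == '\\':
--             mode = ESC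
--         elif ch == '(':
--             depth += 1
--             q = False
--         elif ch == ')':
--             if depth == 0:
--                 return False
--             depth -= 1
--             q = True
--         elif ch == '[':
--             mode = CLS
--         elif ch == '{':
--             saved_q = q
--             mode = BR0
--         elif ch in '*+?':
--             if not q:
--                 return False
--             q = False
--         elif ch in '}]':
--             return False
--         else:
--             q = True
--     return mode not in (ESC, CLS, CLS_ESC) and depth == 0
-- ===== Notes on version B (the rewrite author's own statement) =====
-- stated objective: alternative
-- what changed: A's pointer-based while-loop with inline lookahead scans (a j-pointer scan for '[...]' and a digits[,digits]'}' lookahead parse for '{', plus a stack list and a prev-tag string) is replaced by a single streaming DFA: one pass over the characters with an explicit mode (normal / escape / char-class / three brace phases), a boolean 'quantifiable' flag instead of the prev tag, and a depth counter instead of the stack; failed brace quantifiers fall through to normal processing instead of being re-scanned.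
import Mathlib
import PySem

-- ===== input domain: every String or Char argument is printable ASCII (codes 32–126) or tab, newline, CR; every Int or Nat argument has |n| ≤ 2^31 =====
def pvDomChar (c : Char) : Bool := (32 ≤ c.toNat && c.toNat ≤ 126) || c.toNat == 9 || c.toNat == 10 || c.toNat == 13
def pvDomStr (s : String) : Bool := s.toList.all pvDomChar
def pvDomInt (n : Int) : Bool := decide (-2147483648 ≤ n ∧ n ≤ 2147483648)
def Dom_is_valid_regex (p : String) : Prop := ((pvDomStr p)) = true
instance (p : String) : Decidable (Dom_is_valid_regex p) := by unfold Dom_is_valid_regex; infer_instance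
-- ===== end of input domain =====

-- B replaces A's pointer-and-lookahead loop by a single streaming DFA (explicit
-- mode for escape / char-class / brace phases, a quantifiable flag and a depth
-- counter); objective: an alternative algorithm of the same cost.

-- ===== PORT A =====
-- A's inner "while j < n and p[j].isdigit(): j += 1" loop (isdigit exact on ASCII).
def pvSkipDigitsA : List Char → List Char
  | [] => []
  | c :: rest => if PySem.Chars.isdigit c then pvSkipDigitsA rest else c :: rest

-- A's inner '[' scan: '\' skips two (possibly past the end), ']' found, else advance.
def pvScanClassA : List Char → Option (List Char)
  | [] => none
  | c :: rest =>
    if c = '\\' then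
      match rest with
      | [] => none            -- j += 2 runs past n: loop ends, found = False
      | _ :: r => pvScanClassA r
    else if c = ']' then some rest
    else pvScanClassA rest
  termination_by l => l.length
  decreasing_by all_goals (simp only [List.length_cons]; omega)

-- A's "if j < n and p[j].isdigit()" guard.
def pvHeadDigitA (l : List Char) : Bool :=
  match l with
  | d :: _ => PySem.Chars.isdigit d
  | [] => false

-- A's case-5 parse attempt after '{': digits [',' digits] '}' ⇒ some rest-after-'}'.
def pvBraceA (rest : List Char) : Option (List Char) :=
  if pvHeadDigitA rest then
    match (match pvSkipDigitsA rest with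
           | ',' :: r2 => pvSkipDigitsA r2
           | l2 => l2) with
    | '}' :: r3 => some r3
    | _ => none
  else none

theorem pvSkipDigitsA_length (l : List Char) : (pvSkipDigitsA l).length ≤ l.length := by
  induction l with
  | nil => simp [pvSkipDigitsA]
  | cons c rest ih =>
    simp only [pvSkipDigitsA]
    split
    · exact Nat.le_succ_of_le ih
    · simp

theorem pvScanClassA_length (l r : List Char) (h : pvScanClassA l = some r) :
    r.length < l.length := by
  induction l using pvScanClassA.induct generalizing r with
  | case1 => simp [pvScanClassA] at h
  | case2 => simp [pvScanClassA] at h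
  | case3 head r' ih =>
    rw [pvScanClassA.eq_def] at h
    simp at h
    have := ih r h
    simp only [List.length_cons]
    omega
  | case4 r' hne =>
    rw [pvScanClassA.eq_def] at h
    simp at h
    subst h
    simp
  | case5 head r' h1 h2 ih =>
    rw [pvScanClassA.eq_def] at h
    simp [h1, h2] at h
    have := ih r h
    simp only [List.length_cons]
    omega

theorem pvBraceA_length (l r : List Char) (h : pvBraceA l = some r) :
    r.length < l.length := by
  unfold pvBraceA at h
  split at h
  · split at h
    · rename_i r3 heq
      cases h
      split at heq
      · rename_i r2 e1
        have a := pvSkipDigitsA_length l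
        have b := pvSkipDigitsA_length r2
        rw [e1] at a
        rw [heq] at b
        simp at a b
        omega
      · have a := pvSkipDigitsA_length l
        rw [heq] at a
        simp at a
        omega
    · simp at h
  · simp at h

-- The while loop of A over the remaining characters; stack is a cons-list
-- (append/pop at the same end), prev the Python string tag.
def pvLoopA : List Char → Option String → List Char → Bool
  | [], _, stack => if stack ≠ [] then false else true
  | c :: rest, prev, stack =>
    if c = '\\' then
      match rest with
      | [] => false
      | _ :: r => pvLoopA r (some "literal") stack
    else if c = '(' then pvLoopA rest (some "open") (')' :: stack)
    else if c = ')' then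
      match stack with
      | [] => false
      | top :: s' => if top ≠ ')' then false else pvLoopA rest (some "close") s'
    else if c = '[' then
      if rest.isEmpty then false
      else
        match h : pvScanClassA rest with
        | none => false
        | some r => pvLoopA r (some "literal") stack
    else if c = '{' then
      match h : pvBraceA rest with
      | some r3 =>
        if prev ≠ some "literal" ∧ prev ≠ some "close" then false
        else pvLoopA r3 (some "quantifier") stack
      | none => pvLoopA rest (some "literal") stack
    else if c = '*' ∨ c = '+' ∨ c = '?' then
      if prev ≠ some "literal" ∧ prev ≠ some "close" then false
      else pvLoopA rest (some "quantifier") stack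
    else if c = '}' ∨ c = ']' then false
    else pvLoopA rest (some "literal") stack
  termination_by l _ _ => l.length
  decreasing_by
  all_goals simp only [List.length_cons]
  · omega
  · omega
  · omega
  · have := pvScanClassA_length rest r (by assumption); omega
  · have := pvBraceA_length rest r3 (by assumption); omega
  · omega
  · omega
  · omega

def is_valid_regex (p : String) : Bool := pvLoopA p.toList none []

-- ===== PORT B =====
-- Source B's mode constants: 0 NORMAL, 1 ESC, 2 CLS, 3 CLS_ESC, 4 BR0, 5 BR1, 6 BR2.
-- One DFA step in NORMAL mode; state = (mode, q, depth, savedq); none = return False.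
def pvStepN (q : Bool) (depth : Nat) (savedq : Bool) (c : Char) :
    Option (Nat × Bool × Nat × Bool) :=
  if c = '\\' then some (1, q, depth, savedq)
  else if c = '(' then some (0, false, depth + 1, savedq)
  else if c = ')' then
    match depth with
    | 0 => none
    | d + 1 => some (0, true, d, savedq)
  else if c = '[' then some (2, q, depth, savedq)
  else if c = '{' then some (4, q, depth, q)      -- saved_q := q
  else if c = '*' ∨ c = '+' ∨ c = '?' then
    if q then some (0, false, depth, savedq) else none
  else if c = '}' ∨ c = ']' then none
  else some (0, true, depth, savedq)

-- One DFA step in any mode (the body of Source B's for-loop); brace-phase failure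
-- falls through to NORMAL processing of the same character with q := true.
def pvStepB (mode : Nat) (q : Bool) (depth : Nat) (savedq : Bool) (c : Char) :
    Option (Nat × Bool × Nat × Bool) :=
  if mode = 1 then some (0, true, depth, savedq)
  else if mode = 3 then some (2, q, depth, savedq)
  else if mode = 2 then
    if c = '\\' then some (3, q, depth, savedq)
    else if c = ']' then some (0, true, depth, savedq)
    else some (2, q, depth, savedq)
  else if mode ≠ 0 then
    if PySem.Chars.isdigit c then some (if mode = 4 then 5 else mode, q, depth, savedq)
    else if mode = 5 ∧ c = ',' then some (6, q, depth, savedq)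
    else if mode ≠ 4 ∧ c = '}' then
      if savedq then some (0, false, depth, savedq) else none
    else pvStepN true depth savedq c
  else pvStepN q depth savedq c

-- The for-loop: step through the characters, then the final acceptance test.
def pvRunB (mode : Nat) (q : Bool) (depth : Nat) (savedq : Bool) : List Char → Bool
  | [] => decide (mode ≠ 1 ∧ mode ≠ 2 ∧ mode ≠ 3) && depth == 0
  | c :: r =>
    match pvStepB mode q depth savedq c with
    | none => false
    | some (m, q', d, s) => pvRunB m q' d s r

def is_valid_regex_alt (p : String) : Bool := pvRunB 0 false 0 false p.toList

-- ===== PRECONDITION & SPEC =====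
def Spec_is_valid_regex (p : String) (out : Bool) : Prop := out = is_valid_regex_alt p
instance (p : String) (out : Bool) : Decidable (Spec_is_valid_regex p out) := by unfold Spec_is_valid_regex; infer_instance

-- ===== CLAIM (what is proved, stated in full; the proofs are below) =====
def Claim_equal_is_valid_regex : Prop := ∀ (p : String), Dom_is_valid_regex p → Spec_is_valid_regex p (is_valid_regex p)

-- ===== LEMMAS AND PROOFS =====

theorem pvDigit_ne (c x : Char) (h : PySem.Chars.isdigit c = true)
    (hx : PySem.Chars.isdigit x = false) : ¬ c = x := by
  intro e; subst e; rw [h] at hx; cases hx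

-- a digit is a plain literal in NORMAL mode
theorem pvStepN_digit (q : Bool) (d : Nat) (s : Bool) (c : Char)
    (h : PySem.Chars.isdigit c = true) :
    pvStepN q d s c = some (0, true, d, s) := by
  have h1 := pvDigit_ne c '\\' h (by decide)
  have h2 := pvDigit_ne c '(' h (by decide)
  have h3 := pvDigit_ne c ')' h (by decide)
  have h4 := pvDigit_ne c '[' h (by decide)
  have h5 := pvDigit_ne c '{' h (by decide)
  have h6 := pvDigit_ne c '*' h (by decide)
  have h7 := pvDigit_ne c '+' h (by decide)
  have h8 := pvDigit_ne c '?' h (by decide)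
  have h9 := pvDigit_ne c '}' h (by decide)
  have h10 := pvDigit_ne c ']' h (by decide)
  simp [pvStepN, h1, h2, h3, h4, h5, h6, h7, h8, h9, h10]

theorem pvStepN_comma (q : Bool) (d : Nat) (s : Bool) :
    pvStepN q d s ',' = some (0, true, d, s) := by
  simp [pvStepN]

-- replaying a digit prefix in NORMAL mode is a no-op (each digit is a literal)
theorem pvRunB_skipDigits (d : Nat) (s : Bool) (l : List Char) :
    pvRunB 0 true d s l = pvRunB 0 true d s (pvSkipDigitsA l) := by
  induction l with
  | nil => simp [pvSkipDigitsA]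
  | cons c r ih =>
    by_cases hc : PySem.Chars.isdigit c = true
    · rw [show pvSkipDigitsA (c :: r) = pvSkipDigitsA r by simp [pvSkipDigitsA, hc], ← ih]
      simp [pvRunB, pvStepB, pvStepN_digit _ _ _ _ hc]
    · rw [show pvSkipDigitsA (c :: r) = c :: r by simp [pvSkipDigitsA, hc]]

-- what the BR2 phase computes, phrased over the digit-skipped tail
def pvBr2Spec (q : Bool) (d : Nat) (s : Bool) (l : List Char) : Bool :=
  match pvSkipDigitsA l with
  | [] => pvRunB 0 true d s []
  | c :: r =>
    if c = '}' then (if s then pvRunB 0 false d s r else false)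
    else pvRunB 0 true d s (c :: r)

-- what the BR1 phase computes
def pvBr1Spec (q : Bool) (d : Nat) (s : Bool) (l : List Char) : Bool :=
  match pvSkipDigitsA l with
  | [] => pvRunB 0 true d s []
  | c :: r =>
    if c = ',' then pvRunB 6 q d s r
    else if c = '}' then (if s then pvRunB 0 false d s r else false)
    else pvRunB 0 true d s (c :: r)

theorem pvRunB_br2 (q : Bool) (d : Nat) (s : Bool) (l : List Char) :
    pvRunB 6 q d s l = pvBr2Spec q d s l := by
  induction l with
  | nil => simp [pvBr2Spec, pvSkipDigitsA, pvRunB]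
  | cons c r ih =>
    by_cases hc : PySem.Chars.isdigit c = true
    · have step : pvRunB 6 q d s (c :: r) = pvRunB 6 q d s r := by
        simp [pvRunB, pvStepB, hc]
      rw [step, ih]
      simp only [pvBr2Spec,
        show pvSkipDigitsA (c :: r) = pvSkipDigitsA r by simp [pvSkipDigitsA, hc]]
    · have hskip : pvSkipDigitsA (c :: r) = c :: r := by simp [pvSkipDigitsA, hc]
      by_cases h7 : c = '}'
      · subst h7
        have hd : PySem.Chars.isdigit '}' = false := by decide
        cases s <;> simp [pvRunB, pvStepB, pvBr2Spec, hskip, hd]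
      · have e1 : pvStepB 6 q d s c = pvStepN true d s c := by
          simp [pvStepB, hc, h7]
        have e2 : pvStepB 0 true d s c = pvStepN true d s c := by
          simp [pvStepB]
        simp only [pvBr2Spec, hskip, if_neg h7, pvRunB, e1, e2]

theorem pvRunB_br1 (q : Bool) (d : Nat) (s : Bool) (l : List Char) :
    pvRunB 5 q d s l = pvBr1Spec q d s l := by
  induction l with
  | nil => simp [pvBr1Spec, pvSkipDigitsA, pvRunB]
  | cons c r ih =>
    by_cases hc : PySem.Chars.isdigit c = true
    · have step : pvRunB 5 q d s (c :: r) = pvRunB 5 q d s r := by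
        simp [pvRunB, pvStepB, hc]
      rw [step, ih]
      simp only [pvBr1Spec,
        show pvSkipDigitsA (c :: r) = pvSkipDigitsA r by simp [pvSkipDigitsA, hc]]
    · have hskip : pvSkipDigitsA (c :: r) = c :: r := by simp [pvSkipDigitsA, hc]
      by_cases h6 : c = ','
      · subst h6
        have hd : PySem.Chars.isdigit ',' = false := by decide
        simp [pvRunB, pvStepB, pvBr1Spec, hskip, hd]
      · by_cases h7 : c = '}'
        · subst h7
          have hd : PySem.Chars.isdigit '}' = false := by decide
          cases s <;> simp [pvRunB, pvStepB, pvBr1Spec, hskip, hd, h6]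
        · have e1 : pvStepB 5 q d s c = pvStepN true d s c := by
            simp [pvStepB, hc, h6, h7]
          have e2 : pvStepB 0 true d s c = pvStepN true d s c := by
            simp [pvStepB]
          simp only [pvBr1Spec, hskip, if_neg h6, if_neg h7, pvRunB, e1, e2]

-- A's '{' lookahead parse, reduced to the same shape as the BR-phase specs
theorem pvBraceA_digit (c : Char) (r : List Char) (hc : PySem.Chars.isdigit c = true) :
    pvBraceA (c :: r)
      = (match pvSkipDigitsA r with
         | [] => none
         | c2 :: r2 =>
           if c2 = ',' then
             (match pvSkipDigitsA r2 with
              | [] => none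
              | c3 :: r3 => if c3 = '}' then some r3 else none)
           else if c2 = '}' then some r2 else none) := by
  unfold pvBraceA
  rw [show pvHeadDigitA (c :: r) = true by simp [pvHeadDigitA, hc], if_pos rfl,
      show pvSkipDigitsA (c :: r) = pvSkipDigitsA r by simp [pvSkipDigitsA, hc]]
  cases pvSkipDigitsA r with
  | nil => rfl
  | cons c2 r2 =>
    by_cases h6 : c2 = ','
    · subst h6
      simp only [if_pos rfl]
      cases pvSkipDigitsA r2 with
      | nil => rfl
      | cons c3 r3 =>
        by_cases h7 : c3 = '}'
        · subst h7; simp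
        · simp only [if_neg h7]
          split
          · rename_i heq; exact absurd (by injection heq) h7
          · rfl
    · have hm : (match (c2 :: r2 : List Char) with
          | ',' :: x => pvSkipDigitsA x
          | l2 => l2) = c2 :: r2 := by
        split
        · rename_i heq; exact absurd (by injection heq) h6
        · rfl
      rw [hm]
      simp only [if_neg h6]
      by_cases h7 : c2 = '}'
      · subst h7; simp
      · simp only [if_neg h7]
        split
        · rename_i heq; exact absurd (by injection heq) h7
        · rfl

-- the whole '{' attempt, related to A's lookahead parse pvBraceA
theorem pvRunB_brace (q : Bool) (d : Nat) (l : List Char) :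
    pvRunB 4 q d q l
      = (match pvBraceA l with
         | some r3 => if q then pvRunB 0 false d q r3 else false
         | none => pvRunB 0 true d q l) := by
  cases l with
  | nil => simp [pvBraceA, pvHeadDigitA, pvRunB]
  | cons c r =>
    by_cases hc : PySem.Chars.isdigit c = true
    · have step : pvRunB 4 q d q (c :: r) = pvRunB 5 q d q r := by
        simp [pvRunB, pvStepB, hc]
      have replay : pvRunB 0 true d q (c :: r) = pvRunB 0 true d q (pvSkipDigitsA r) := by
        rw [show pvRunB 0 true d q (c :: r) = pvRunB 0 true d q r by
              simp [pvRunB, pvStepB, pvStepN_digit _ _ _ _ hc],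
            pvRunB_skipDigits]
      rw [step, pvRunB_br1, pvBraceA_digit c r hc]
      simp only [pvBr1Spec]
      rw [replay]
      cases hsk : pvSkipDigitsA r with
      | nil => simp
      | cons c2 r2 =>
        by_cases h6 : c2 = ','
        · subst h6
          simp only [if_pos rfl]
          rw [pvRunB_br2]
          simp only [pvBr2Spec]
          have hcm : pvRunB 0 true d q (',' :: r2) = pvRunB 0 true d q (pvSkipDigitsA r2) := by
            rw [show pvRunB 0 true d q (',' :: r2) = pvRunB 0 true d q r2 by
                  simp [pvRunB, pvStepB, pvStepN_comma],
                pvRunB_skipDigits]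
          rw [hcm]
          cases pvSkipDigitsA r2 with
          | nil => simp
          | cons c3 r3 =>
            by_cases h7 : c3 = '}'
            · subst h7; simp
            · simp [h7]
        · by_cases h7 : c2 = '}'
          · subst h7; simp [h6]
          · simp [h6, h7]
    · have hb : pvBraceA (c :: r) = none := by
        simp [pvBraceA, pvHeadDigitA, hc]
      rw [hb]
      have e1 : pvStepB 4 q d q c = pvStepN true d q c := by
        simp [pvStepB, hc]
      have e2 : pvStepB 0 true d q c = pvStepN true d q c := by
        simp [pvStepB]
      simp only [pvRunB, e1, e2]

-- reduction lemmas for A's class scan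
theorem pvScanClassA_esc (x : Char) (r : List Char) :
    pvScanClassA ('\\' :: x :: r) = pvScanClassA r := by
  rw [pvScanClassA.eq_def]; simp

theorem pvScanClassA_close (r : List Char) : pvScanClassA (']' :: r) = some r := by
  rw [pvScanClassA.eq_def]; simp

theorem pvScanClassA_other (c : Char) (r : List Char) (h1 : ¬c = '\\') (h2 : ¬c = ']') :
    pvScanClassA (c :: r) = pvScanClassA r := by
  rw [pvScanClassA.eq_def]; simp [h1, h2]

-- the '[' class scan, related to A's lookahead scan pvScanClassA
theorem pvRunB_cls (q : Bool) (d : Nat) (s : Bool) (l : List Char) :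
    pvRunB 2 q d s l
      = (match pvScanClassA l with
         | none => false
         | some r => pvRunB 0 true d s r) := by
  induction l using pvScanClassA.induct with
  | case1 => simp [pvScanClassA, pvRunB]
  | case2 => simp [pvScanClassA, pvRunB, pvStepB]
  | case3 x r ih =>
    rw [pvScanClassA_esc, ← ih]
    simp [pvRunB, pvStepB]
  | case4 r hne =>
    rw [pvScanClassA_close]
    simp [pvRunB, pvStepB]
  | case5 c r h1 h2 ih =>
    rw [pvScanClassA_other c r h1 h2, ← ih]
    simp [pvRunB, pvStepB, h1, h2]

-- the main loop correspondence: A's (prev, stack) vs B's (q, depth)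
theorem pvMain (l : List Char) (prevA : Option String) (stack : List Char) :
    (∀ c ∈ stack, c = ')') → ∀ (q savedq : Bool),
    ((prevA = some "literal" ∨ prevA = some "close") ↔ q = true) →
    pvLoopA l prevA stack = pvRunB 0 q stack.length savedq l := by
  induction l, prevA, stack using pvLoopA.induct with
  | case1 prev stack hne =>
    intro hst q s hp
    rw [pvLoopA.eq_def]
    cases stack with
    | nil => simp at hne
    | cons a st => simp [pvRunB]
  | case2 prev stack hne =>
    intro hst q s hp
    simp at hne
    subst hne
    rw [pvLoopA.eq_def]
    simp [pvRunB]
  | case3 prev stack =>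
    intro hst q s hp
    rw [pvLoopA.eq_def]
    simp [pvRunB, pvStepB, pvStepN]
  | case4 prev stack c rest ih =>
    intro hst q s hp
    rw [pvLoopA.eq_def]
    simp only [if_pos rfl]
    have := ih hst true s (by simp)
    simp [pvRunB, pvStepB, pvStepN, this]
  | case5 rest prev stack _ ih =>
    intro hst q s hp
    rw [pvLoopA.eq_def]
    have hst' : ∀ c ∈ ')' :: stack, c = ')' := by
      intro c hc
      rcases List.mem_cons.mp hc with h | h
      · exact h
      · exact hst c h
    have := ih hst' false s (by simp)
    simp [pvRunB, pvStepB, pvStepN, this]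
  | case6 rest prev h1 h2 =>
    intro hst q s hp
    rw [pvLoopA.eq_def]
    simp [pvRunB, pvStepB, pvStepN]
  | case7 rest prev top s' htop _ _ =>
    intro hst q s hp
    exact absurd (hst top (List.mem_cons_self ..)) htop
  | case8 rest prev top s' htop _ _ ih =>
    intro hst q s hp
    rw [pvLoopA.eq_def]
    simp at htop
    have hst' : ∀ c ∈ s', c = ')' := fun c hc => hst c (List.mem_cons_of_mem _ hc)
    have := ih hst' true s (by simp)
    simp [pvRunB, pvStepB, pvStepN, htop, this]
  | case9 rest prev stack hemp =>
    intro hst q s hp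
    rw [pvLoopA.eq_def]
    rw [List.isEmpty_iff] at hemp
    subst hemp
    simp [pvRunB, pvStepB, pvStepN, pvRunB_cls, pvScanClassA]
  | case10 rest prev stack hemp hscan =>
    intro hst q s hp
    rw [pvLoopA.eq_def]
    simp only [hscan, hemp]
    have step : pvRunB 0 q stack.length s ('[' :: rest) = pvRunB 2 q stack.length s rest := by
      simp [pvRunB, pvStepB, pvStepN]
    rw [step, pvRunB_cls, hscan]
    simp
  | case11 rest prev stack hemp r hscan _ _ _ ih =>
    intro hst q s hp
    rw [pvLoopA.eq_def]
    simp only [hscan, hemp]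
    have step : pvRunB 0 q stack.length s ('[' :: rest) = pvRunB 2 q stack.length s rest := by
      simp [pvRunB, pvStepB, pvStepN]
    rw [step, pvRunB_cls, hscan]
    have := ih hst true s (by simp)
    simp [this]
  | case12 rest prev stack r3 hbrace hbad _ _ _ _ =>
    intro hst q s hp
    rw [pvLoopA.eq_def]
    have hq : q = false := by
      cases q with
      | false => rfl
      | true =>
        rcases hp.mpr rfl with h | h <;> simp [h] at hbad
    subst hq
    have step : pvRunB 0 false stack.length s ('{' :: rest)
        = pvRunB 4 false stack.length false rest := by
      simp [pvRunB, pvStepB, pvStepN]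
    rw [step, pvRunB_brace, hbrace]
    simp [hbad]
    split
    · rfl
    · rename_i heq
      rw [hbrace] at heq
      cases heq
  | case13 rest prev stack r3 hbrace hok _ _ _ _ ih =>
    intro hst q s hp
    rw [pvLoopA.eq_def]
    have hgood : prev = some "literal" ∨ prev = some "close" := by
      by_contra hno
      push Not at hno
      exact hok ⟨hno.1, hno.2⟩
    have hq : q = true := hp.mp hgood
    subst hq
    have step : pvRunB 0 true stack.length s ('{' :: rest)
        = pvRunB 4 true stack.length true rest := by
      simp [pvRunB, pvStepB, pvStepN]
    rw [step, pvRunB_brace, hbrace]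
    have := ih hst false true (by simp)
    simp [this]
    split
    · rename_i r3' heq
      rw [hbrace] at heq
      injection heq with he
      subst he
      rcases hgood with hg | hg <;> simp [hg, this]
    · rename_i heq
      rw [hbrace] at heq
      cases heq
  | case14 rest prev stack hbrace _ _ _ _ ih =>
    intro hst q s hp
    rw [pvLoopA.eq_def]
    simp only [hbrace]
    have step : pvRunB 0 q stack.length s ('{' :: rest)
        = pvRunB 4 q stack.length q rest := by
      simp [pvRunB, pvStepB, pvStepN]
    rw [step, pvRunB_brace, hbrace]
    have := ih hst true q (by simp)
    simp [this]
  | case15 c rest prev stack h1 h2 h3 h4 h5 hstar hbad =>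
    intro hst q s hp
    rw [pvLoopA.eq_def]
    have hq : q = false := by
      cases q with
      | false => rfl
      | true =>
        rcases hp.mpr rfl with h | h <;> simp [h] at hbad
    subst hq
    simp [pvRunB, pvStepB, pvStepN, h1, h2, h3, h4, h5, hstar, hbad]
  | case16 c rest prev stack h1 h2 h3 h4 h5 hstar hok ih =>
    intro hst q s hp
    rw [pvLoopA.eq_def]
    have hgood : prev = some "literal" ∨ prev = some "close" := by
      by_contra hno
      push Not at hno
      exact hok ⟨hno.1, hno.2⟩
    have hq : q = true := hp.mp hgood
    subst hq
    have := ih hst false s (by simp)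
    simp [pvRunB, pvStepB, pvStepN, h1, h2, h3, h4, h5, hstar, hok, hgood, this]
  | case17 c rest prev stack h1 h2 h3 h4 h5 h6 h7 =>
    intro hst q s hp
    rw [pvLoopA.eq_def]
    simp [pvRunB, pvStepB, pvStepN, h1, h2, h3, h4, h5, h6, h7]
  | case18 c rest prev stack h1 h2 h3 h4 h5 h6 h7 ih =>
    intro hst q s hp
    rw [pvLoopA.eq_def]
    have := ih hst true s (by simp)
    simp [pvRunB, pvStepB, pvStepN, h1, h2, h3, h4, h5, h6, h7, this]

-- ===== VERDICT (by name: the statement is the Claim_ definition above) =====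
theorem is_valid_regex_spec : Claim_equal_is_valid_regex := by
  intro p _
  unfold Spec_is_valid_regex is_valid_regex is_valid_regex_alt
  exact pvMain p.toList none [] (by simp) false false (by simp)
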